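-- pv_equiv track=rewrite | github.com/TradeSkillMaster/BonusIdTool | generate_addon_data.py | _dedup_entries
-- ===== SOURCE A (Python) =====
-- _OP_GROUP = {'scale': 'S', 'set': 'S', 'add': 'Q'}
--
-- def _dedup_entries(entries):
--     """Keep only the last entry per group. Ops without a group always kept."""
--     seen = {}  # group -> index
--     for i, entry in enumerate(entries):
--         group = _OP_GROUP.get(entry['op'])
--         if group is not None:
--             seen[group] = i
--     return [e for i, e in enumerate(entries)
--             if _OP_GROUP.get(e['op']) is None or seen[_OP_GROUP[e['op']]] == i]
-- ===== SOURCE B (Python) =====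
-- _OP_GROUP = {'scale': 'S', 'set': 'S', 'add': 'Q'}
--
-- def _dedup_entries(entries):
--     """Single backward pass: keep the first occurrence of each group seen
--     from the end (= last overall), keep every ungrouped op; then restore order."""
--     seen_groups = set()
--     result = []
--     for entry in reversed(entries):
--         group = _OP_GROUP.get(entry['op'])
--         if group is None:
--             result.append(entry)
--         elif group not in seen_groups:
--             seen_groups.add(group)
--             result.append(entry)
--     result.reverse()
--     return result
-- ===== Notes on version B (the rewrite author's own statement) =====
-- stated objective: alternative
-- what changed: B makes one backward pass keeping a membership set of groups already emitted (first-from-the-end = last overall) and reverses the collected list, instead of A's two forward passes with a dict of last indices and an index-comparing filter.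
import Mathlib
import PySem

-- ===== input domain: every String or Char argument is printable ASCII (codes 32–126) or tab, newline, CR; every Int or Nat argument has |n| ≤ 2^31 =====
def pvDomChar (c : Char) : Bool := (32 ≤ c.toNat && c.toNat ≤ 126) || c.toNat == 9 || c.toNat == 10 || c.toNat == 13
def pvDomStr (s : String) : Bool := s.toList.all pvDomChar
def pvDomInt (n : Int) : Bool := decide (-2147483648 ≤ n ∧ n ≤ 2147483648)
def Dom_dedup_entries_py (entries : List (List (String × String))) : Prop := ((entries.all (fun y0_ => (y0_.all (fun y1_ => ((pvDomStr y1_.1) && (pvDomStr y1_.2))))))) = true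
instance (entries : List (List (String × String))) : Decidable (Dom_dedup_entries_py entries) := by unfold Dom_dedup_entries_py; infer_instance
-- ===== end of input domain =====

-- B replaces A's two forward passes (dict of last index per group, then an index-comparing filter)
-- by one backward pass with a set of already-emitted groups, reversed at the end; same return value.

-- ===== PORT A =====
def pvOpGroupA : PySem.Dict String String :=
  PySem.Dict.ofList [("scale", "S"), ("set", "S"), ("add", "Q")]

-- _OP_GROUP.get(entry['op']); a missing 'op' key (KeyError in Python, excluded by Pre_) yields none here
def pvGrpA (e : List (String × String)) : Option String :=
  match (PySem.Dict.mk e).get? "op" with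
  | some op => pvOpGroupA.get? op
  | none => none

def dedup_entries_py (entries : List (List (String × String))) : List (List (String × String)) :=
  let seen := (PySem.List.enumerate entries).foldl
    (fun d ie => match pvGrpA ie.2 with
      | some g => d.insert g ie.1
      | none => d) PySem.Dict.empty
  ((PySem.List.enumerate entries).filter
    (fun ie => match pvGrpA ie.2 with
      | none => true
      | some g => seen.get? g == some ie.1)).map (·.2)

-- ===== PORT B =====
def pvOpGroupB : PySem.Dict String String :=
  PySem.Dict.ofList [("scale", "S"), ("set", "S"), ("add", "Q")]

-- _OP_GROUP.get(entry['op']); a missing 'op' key (KeyError in Python, excluded by Pre_) yields none here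
def pvGrpB (e : List (String × String)) : Option String :=
  match (PySem.Dict.mk e).get? "op" with
  | some op => pvOpGroupB.get? op
  | none => none

def dedup_entries_py_alt (entries : List (List (String × String))) : List (List (String × String)) :=
  let st := entries.reverse.foldl
    (fun (st : PySem.Set String × List (List (String × String))) entry =>
      match pvGrpB entry with
      | none => (st.1, st.2 ++ [entry])
      | some g => if st.1.contains g then st else (PySem.Set.add st.1 g, st.2 ++ [entry]))
    (PySem.Set.empty, [])
  st.2.reverse

-- ===== PRECONDITION & SPEC =====
-- Pre_ excludes exactly the inputs where some entry lacks the key "op": there Python A (and B) raise KeyError.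
def Pre_dedup_entries_py (entries : List (List (String × String))) : Prop :=
  ∀ e ∈ entries, (PySem.Dict.mk e).get? "op" ≠ none
instance (entries : List (List (String × String))) : Decidable (Pre_dedup_entries_py entries) := by
  unfold Pre_dedup_entries_py; infer_instance

def pvWitness_dedup_entries_py : (List (List (String × String))) :=
  [[("op", "scale"), ("v", "1")], [("op", "other")], [("op", "set")], [("op", "add")], [("op", "add")]]

def Spec_dedup_entries_py (entries : List (List (String × String))) (out : List (List (String × String))) : Prop := out = dedup_entries_py_alt entries
instance (entries : List (List (String × String))) (out : List (List (String × String))) : Decidable (Spec_dedup_entries_py entries out) := by unfold Spec_dedup_entries_py; infer_instance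

-- ===== CLAIM (what is proved, stated in full; the proofs are below) =====
def Claim_equal_dedup_entries_py : Prop := ∀ (entries : List (List (String × String))), Dom_dedup_entries_py entries → Pre_dedup_entries_py entries → Spec_dedup_entries_py entries (dedup_entries_py entries)

-- ===== LEMMAS AND PROOFS =====

-- Reference function: keep an entry iff it has no group or no later entry has the same group.
def pvRef : List (List (String × String)) → List (List (String × String))
  | [] => []
  | e :: t =>
    (match pvGrpA e with
      | none => [e]
      | some g => if t.all (fun e' => pvGrpA e' != some g) then [e] else []) ++ pvRef t

theorem pvGrpB_eq : pvGrpB = pvGrpA := rfl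

-- last index with group g in an enumerated list
def pvLast (g : String) : List (Int × List (String × String)) → Option Int
  | [] => none
  | ie :: l =>
    match pvLast g l with
    | some i => some i
    | none => if pvGrpA ie.2 = some g then some ie.1 else none

theorem pvSeen_get (l : List (Int × List (String × String))) (d : PySem.Dict String Int) (g : String) :
    (l.foldl (fun d ie => match pvGrpA ie.2 with
      | some g => d.insert g ie.1
      | none => d) d).get? g
    = (match pvLast g l with
       | some i => some i
       | none => d.get? g) := by
  induction l generalizing d with
  | nil => simp [pvLast]
  | cons x l ih =>
    simp only [List.foldl_cons, pvLast]
    rw [ih]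
    cases hl : pvLast g l with
    | some i => simp
    | none =>
      cases hx : pvGrpA x.2 with
      | none => simp
      | some g' =>
        rw [PySem.Dict.get?_insert]
        by_cases hgg : g = g'
        · subst hgg; simp
        · simp [hgg, show g' ≠ g from fun h => hgg h.symm]

theorem pvLast_ge (t : List (List (String × String))) (s : Int) (g : String) (i : Int)
    (h : pvLast g (PySem.List.enumerate t s) = some i) : s ≤ i := by
  induction t generalizing s i with
  | nil => simp [PySem.List.enumerate_nil, pvLast] at h
  | cons e t ih =>
    rw [PySem.List.enumerate_cons] at h
    simp only [pvLast] at h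
    cases hl : pvLast g (PySem.List.enumerate t (s + 1)) with
    | some j =>
      rw [hl] at h
      simp only [Option.some.injEq] at h
      subst h
      have := ih (s + 1) j hl
      omega
    | none =>
      rw [hl] at h
      by_cases hg : pvGrpA e = some g
      · simp only [hg, if_true, Option.some.injEq] at h
        omega
      · simp [hg] at h

theorem pvLast_none_iff (t : List (List (String × String))) (s : Int) (g : String) :
    pvLast g (PySem.List.enumerate t s) = none ↔ t.all (fun e' => pvGrpA e' != some g) = true := by
  induction t generalizing s with
  | nil => simp [PySem.List.enumerate_nil, pvLast]
  | cons e t ih =>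
    rw [PySem.List.enumerate_cons]
    simp only [pvLast, List.all_cons, Bool.and_eq_true]
    cases hl : pvLast g (PySem.List.enumerate t (s + 1)) with
    | some j =>
      have hfalse : (t.all fun e' => pvGrpA e' != some g) ≠ true := fun hA => by
        rw [(ih (s + 1)).mpr hA] at hl; cases hl
      simp [hfalse]
    | none =>
      have ht := (ih (s + 1)).mp hl
      by_cases hg : pvGrpA e = some g
      · simp [hg]
      · simp [hg, ht, bne_iff_ne]

theorem pvA_suffix (t : List (List (String × String))) (s : Int) (d : PySem.Dict String Int) :
    ((PySem.List.enumerate t s).filter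
      (fun ie => match pvGrpA ie.2 with
        | none => true
        | some g => ((PySem.List.enumerate t s).foldl (fun d ie => match pvGrpA ie.2 with
            | some g => d.insert g ie.1
            | none => d) d).get? g == some ie.1)).map (·.2) = pvRef t := by
  induction t generalizing s d with
  | nil => simp [PySem.List.enumerate_nil, pvRef]
  | cons e t ih =>
    rw [PySem.List.enumerate_cons]
    simp only [List.foldl_cons, List.filter_cons]
    set d' := (match pvGrpA e with
      | some g => d.insert g s
      | none => d) with hd'
    have tail := ih (s + 1) d'
    cases he : pvGrpA e with
    | none =>
      simp only [he, pvRef]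
      rw [if_pos (by simp), List.map_cons, tail]
      rfl
    | some g =>
      have hd2 : d' = d.insert g s := by simp [hd', he]
      have hseen := pvSeen_get (PySem.List.enumerate t (s + 1)) d' g
      simp only [he, pvRef]
      cases hl : pvLast g (PySem.List.enumerate t (s + 1)) with
      | some i =>
        simp only [hl] at hseen
        have hi := pvLast_ge t (s + 1) g i hl
        have hall : t.all (fun e' => pvGrpA e' != some g) = false := by
          cases hA : t.all (fun e' => pvGrpA e' != some g)
          · rfl
          · rw [(pvLast_none_iff t (s + 1) g).mpr hA] at hl; cases hl
        split
        · next hcond =>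
            rw [hseen] at hcond
            simp only [beq_iff_eq, Option.some.injEq] at hcond
            exfalso; omega
        · next =>
            rw [tail]
            simp [hall]
      | none =>
        simp only [hl] at hseen
        have hsome : ((PySem.List.enumerate t (s + 1)).foldl (fun d ie => match pvGrpA ie.2 with
            | some g => d.insert g ie.1
            | none => d) d').get? g = some s := by
          rw [hseen, hd2, PySem.Dict.get?_insert_self]
        have hall := (pvLast_none_iff t (s + 1) g).mp hl
        split
        · next =>
            rw [List.map_cons, tail]
            simp
        · next hcond =>
            exact absurd (by rw [hsome]; simp) hcond

theorem pvA_eq_ref (entries : List (List (String × String))) :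
    dedup_entries_py entries = pvRef entries := by
  unfold dedup_entries_py
  exact pvA_suffix entries 0 PySem.Dict.empty

theorem pvB_set_mem (l : List (List (String × String))) (s : PySem.Set String)
    (acc : List (List (String × String))) (g : String) :
    g ∈ (l.foldl (fun (st : PySem.Set String × List (List (String × String))) entry =>
      match pvGrpB entry with
      | none => (st.1, st.2 ++ [entry])
      | some g => if st.1.contains g then st else (PySem.Set.add st.1 g, st.2 ++ [entry]))
      (s, acc)).1
    ↔ g ∈ s ∨ ∃ e ∈ l, pvGrpB e = some g := by
  induction l generalizing s acc with
  | nil => simp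
  | cons x l ih =>
    simp only [List.foldl_cons]
    cases hx : pvGrpB x with
    | none =>
      simp only []
      rw [ih]
      constructor
      · rintro (h | ⟨e, he, hg⟩)
        · exact Or.inl h
        · exact Or.inr ⟨e, List.mem_cons_of_mem _ he, hg⟩
      · rintro (h | ⟨e, he, hg⟩)
        · exact Or.inl h
        · rcases List.mem_cons.mp he with rfl | he'
          · rw [hx] at hg; cases hg
          · exact Or.inr ⟨e, he', hg⟩
    | some g' =>
      simp only []
      by_cases hc : PySem.Set.contains s g' = true
      · rw [if_pos hc, ih]
        have hg' : g' ∈ s := (PySem.Set.contains_iff s g').mp hc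
        constructor
        · rintro (h | ⟨e, he, hg⟩)
          · exact Or.inl h
          · exact Or.inr ⟨e, List.mem_cons_of_mem _ he, hg⟩
        · rintro (h | ⟨e, he, hg⟩)
          · exact Or.inl h
          · rcases List.mem_cons.mp he with rfl | he'
            · rw [hx] at hg; injection hg with h'; subst h'; exact Or.inl hg'
            · exact Or.inr ⟨e, he', hg⟩
      · rw [if_neg hc, ih]
        constructor
        · rintro (h | ⟨e, he, hg⟩)
          · rcases (PySem.Set.mem_add s g' g).mp h with h' | rfl
            · exact Or.inl h'
            · exact Or.inr ⟨x, List.mem_cons_self, hx⟩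
          · exact Or.inr ⟨e, List.mem_cons_of_mem _ he, hg⟩
        · rintro (h | ⟨e, he, hg⟩)
          · exact Or.inl ((PySem.Set.mem_add s g' g).mpr (Or.inl h))
          · rcases List.mem_cons.mp he with rfl | he'
            · rw [hx] at hg; injection hg with h'; subst h'
              exact Or.inl ((PySem.Set.mem_add s g' g').mpr (Or.inr rfl))
            · exact Or.inr ⟨e, he', hg⟩

theorem pvB_eq_ref (entries : List (List (String × String))) :
    dedup_entries_py_alt entries = pvRef entries := by
  induction entries with
  | nil => rfl
  | cons e t ih =>
    unfold dedup_entries_py_alt at ih ⊢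
    simp only [List.reverse_cons, List.foldl_append, List.foldl_cons, List.foldl_nil]
    set P := t.reverse.foldl (fun (st : PySem.Set String × List (List (String × String))) entry =>
      match pvGrpB entry with
      | none => (st.1, st.2 ++ [entry])
      | some g => if st.1.contains g then st else (PySem.Set.add st.1 g, st.2 ++ [entry]))
      (PySem.Set.empty, []) with hP
    have ih' : P.2.reverse = pvRef t := ih
    cases he : pvGrpB e with
    | none =>
      simp only [List.reverse_append, List.reverse_cons, List.reverse_nil, List.nil_append,
        List.cons_append]
      rw [ih']
      have heA : pvGrpA e = none := he
      simp [pvRef, heA]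
    | some g =>
      have hmem : g ∈ P.1 ↔ ∃ e' ∈ t, pvGrpB e' = some g := by
        rw [hP, pvB_set_mem]
        simp [PySem.Set.empty]
      have heA : pvGrpA e = some g := he
      simp only []
      by_cases hc : P.1.contains g = true
      · have hex : ∃ e' ∈ t, pvGrpA e' = some g := by
          rw [pvGrpB_eq] at hmem
          exact hmem.mp ((PySem.Set.contains_iff P.1 g).mp hc)
        have hall : t.all (fun e' => pvGrpA e' != some g) = false := by
          rcases hex with ⟨e', he', hg⟩
          by_contra h
          simp only [Bool.not_eq_false, List.all_eq_true] at h
          have := h e' he'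
          simp [hg] at this
        rw [if_pos hc, ih']
        simp [pvRef, heA, hall]
      · have hnex : ¬ ∃ e' ∈ t, pvGrpA e' = some g := by
          rw [pvGrpB_eq] at hmem
          intro h
          exact hc ((PySem.Set.contains_iff P.1 g).mpr (hmem.mpr h))
        have hall : t.all (fun e' => pvGrpA e' != some g) = true := by
          simp only [List.all_eq_true]
          intro e' he'
          simp only [bne_iff_ne, ne_eq]
          exact fun hg => hnex ⟨e', he', hg⟩
        rw [if_neg hc]
        simp only [List.reverse_append, List.reverse_cons, List.reverse_nil, List.nil_append,
          List.cons_append]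
        rw [ih']
        simp [pvRef, heA, hall]

-- ===== VERDICT (by name: the statement is the Claim_ definition above) =====
theorem dedup_entries_py_spec : Claim_equal_dedup_entries_py := by
  intro entries _ _
  unfold Spec_dedup_entries_py
  rw [pvA_eq_ref, pvB_eq_ref]
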